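-- pv_equiv track=rewrite | github.com/thismad/POCDofusFarming | dofus_farmer.py | _zone_to_route
-- ===== SOURCE A (Python) =====
-- def _zone_to_route(coord1, coord2):
--     """Génère une route serpentine à partir de 2 coins en coordonnées monde (x,y).
--     Le serpentin commence toujours depuis le coin haut-gauche (min_x, min_y).
--     Retourne (route_str, width, height)."""
--     x1, y1 = coord1
--     x2, y2 = coord2
--     min_x, max_x = min(x1, x2), max(x1, x2)
--     min_y, max_y = min(y1, y2), max(y1, y2)
--     width = max_x - min_x + 1
--     height = max_y - min_y + 1
--
--     # Construire le chemin serpentin en coordonnées monde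
--     path = []
--     for row_idx in range(height):
--         y = min_y + row_idx
--         if row_idx % 2 == 0:
--             xs = range(min_x, max_x + 1)
--         else:
--             xs = range(max_x, min_x - 1, -1)
--         for x in xs:
--             path.append((x, y))
--
--     # Convertir en directions (right/left = x, bottom/top = y)
--     route = []
--     for (ax, ay), (bx, by) in zip(path, path[1:]):
--         dx, dy = bx - ax, by - ay
--         if dx > 0: route.extend(['r'] * dx)
--         elif dx < 0: route.extend(['l'] * abs(dx))
--         if dy > 0: route.extend(['b'] * dy)
--         elif dy < 0: route.extend(['t'] * abs(dy))
--
--     # Retour au départ en longeant le bord (vertical puis horizontal)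
--     last_x, last_y = path[-1]
--     first_x, first_y = path[0]
--     dy = first_y - last_y
--     dx = first_x - last_x
--     if dy > 0: route.extend(['b'] * dy)
--     elif dy < 0: route.extend(['t'] * abs(dy))
--     if dx > 0: route.extend(['r'] * dx)
--     elif dx < 0: route.extend(['l'] * abs(dx))
--
--     return ''.join(route), width, height
-- ===== SOURCE B (Python) =====
-- def _zone_to_route(coord1, coord2):
--     """Serpentine route built directly from geometry: each row contributes a
--     horizontal run ('r' on even rows, 'l' on odd) plus a 'b' separator, then
--     the return leg is 't'*(height-1) and, if the last row ended at max_x,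
--     'l'*(width-1)."""
--     x1, y1 = coord1
--     x2, y2 = coord2
--     width = abs(x1 - x2) + 1
--     height = abs(y1 - y2) + 1
--     parts = []
--     for row_idx in range(height):
--         parts.append(('r' if row_idx % 2 == 0 else 'l') * (width - 1))
--         if row_idx != height - 1:
--             parts.append('b')
--     parts.append('t' * (height - 1))
--     if (height - 1) % 2 == 0:
--         parts.append('l' * (width - 1))
--     return ''.join(parts), width, height
-- ===== Notes on version B (the rewrite author's own statement) =====
-- stated objective: faster
-- what changed: B drops A's explicit serpentine path list of (x,y) tuples and the pairwise zip-diff loop, emitting the route directly from geometry: per-row character runs with 'b' separators and a closed-form return leg ('t'*(height-1) plus 'l'*(width-1) when height-1 is even).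
import Mathlib
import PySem

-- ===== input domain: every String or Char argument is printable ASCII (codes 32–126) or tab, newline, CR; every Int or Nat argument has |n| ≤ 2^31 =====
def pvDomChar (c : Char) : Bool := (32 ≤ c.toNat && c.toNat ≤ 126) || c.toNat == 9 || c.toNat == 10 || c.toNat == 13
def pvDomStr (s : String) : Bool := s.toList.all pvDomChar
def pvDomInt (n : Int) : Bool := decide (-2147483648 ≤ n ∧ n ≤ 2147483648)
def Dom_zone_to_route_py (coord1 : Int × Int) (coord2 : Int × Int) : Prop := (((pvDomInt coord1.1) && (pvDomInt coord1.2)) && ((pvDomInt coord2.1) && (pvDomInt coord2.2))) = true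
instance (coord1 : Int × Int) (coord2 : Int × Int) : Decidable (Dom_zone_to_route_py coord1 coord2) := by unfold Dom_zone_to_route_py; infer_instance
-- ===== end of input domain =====

-- B replaces A's path list + pairwise zip-diff by direct per-row run emission (faster by a constant factor; return value only).

-- ===== PORT A =====
-- body of A's pairwise loop: the 'r'/'l' run for dx, then the 'b'/'t' run for dy
def pvStepA (a b : Int × Int) : List Char :=
  let dx := b.1 - a.1
  let dy := b.2 - a.2
  (if dx > 0 then List.replicate dx.toNat 'r'
   else if dx < 0 then List.replicate (-dx).toNat 'l' else [])
  ++ (if dy > 0 then List.replicate dy.toNat 'b'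
      else if dy < 0 then List.replicate (-dy).toNat 't' else [])

def zone_to_route_py (coord1 : Int × Int) (coord2 : Int × Int) : String × Int × Int :=
  let x1 := coord1.1; let y1 := coord1.2
  let x2 := coord2.1; let y2 := coord2.2
  let min_x := min x1 x2; let max_x := max x1 x2
  let min_y := min y1 y2; let max_y := max y1 y2
  let width := max_x - min_x + 1
  let height := max_y - min_y + 1
  let path := (PySem.List.pyRange 0 height 1).foldl (fun acc row_idx =>
      let y := min_y + row_idx
      let xs := if PySem.Int.mod row_idx 2 = 0
                then PySem.List.pyRange min_x (max_x + 1) 1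
                else PySem.List.pyRange max_x (min_x - 1) (-1)
      xs.foldl (fun acc x => acc ++ [(x, y)]) acc) ([] : List (Int × Int))
  let route := (path.zip path.tail).foldl (fun acc p => acc ++ pvStepA p.1 p.2) ([] : List Char)
  -- path[-1] / path[0]: path is nonempty (width, height ≥ 1), so the defaults are never taken
  let last := (PySem.List.pyGet? path (-1)).getD (0, 0)
  let first := (PySem.List.pyGet? path 0).getD (0, 0)
  let dy := first.2 - last.2
  let dx := first.1 - last.1
  let route := route ++ (if dy > 0 then List.replicate dy.toNat 'b'
      else if dy < 0 then List.replicate (-dy).toNat 't' else [])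
  let route := route ++ (if dx > 0 then List.replicate dx.toNat 'r'
      else if dx < 0 then List.replicate (-dx).toNat 'l' else [])
  (String.mk route, width, height)

-- ===== PORT B =====
def zone_to_route_py_alt (coord1 : Int × Int) (coord2 : Int × Int) : String × Int × Int :=
  let width := |coord1.1 - coord2.1| + 1
  let height := |coord1.2 - coord2.2| + 1
  let parts := (PySem.List.pyRange 0 height 1).foldl (fun acc row_idx =>
      let acc := acc ++ List.replicate (width - 1).toNat
        (if PySem.Int.mod row_idx 2 = 0 then 'r' else 'l')
      if row_idx ≠ height - 1 then acc ++ ['b'] else acc) ([] : List Char)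
  let parts := parts ++ List.replicate (height - 1).toNat 't'
  let parts := parts ++ (if PySem.Int.mod (height - 1) 2 = 0
      then List.replicate (width - 1).toNat 'l' else [])
  (String.mk parts, width, height)

-- ===== PRECONDITION & SPEC =====
def Spec_zone_to_route_py (coord1 : Int × Int) (coord2 : Int × Int) (out : String × Int × Int) : Prop := out = zone_to_route_py_alt coord1 coord2
instance (coord1 : Int × Int) (coord2 : Int × Int) (out : String × Int × Int) : Decidable (Spec_zone_to_route_py coord1 coord2 out) := by unfold Spec_zone_to_route_py; infer_instance

-- ===== CLAIM (what is proved, stated in full; the proofs are below) =====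
def Claim_equal_zone_to_route_py : Prop := ∀ (coord1 : Int × Int) (coord2 : Int × Int), Dom_zone_to_route_py coord1 coord2 → Spec_zone_to_route_py coord1 coord2 (zone_to_route_py coord1 coord2)

-- ===== LEMMAS AND PROOFS =====

-- pvR: the pairwise zip-diff route of a path, as structural recursion
def pvR : List (Int × Int) → List Char
  | [] => []
  | [_] => []
  | a :: b :: t => pvStepA a b ++ pvR (b :: t)

lemma pvR_eq_flatMap (xs : List (Int × Int)) :
    (xs.zip xs.tail).flatMap (fun p => pvStepA p.1 p.2) = pvR xs := by
  match xs with
  | [] => rfl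
  | [_] => rfl
  | a :: b :: t =>
    simp only [List.tail_cons, List.zip_cons_cons, List.flatMap_cons, pvR]
    rw [← pvR_eq_flatMap (b :: t)]
    rfl

-- ascending / descending rows as structural recursion
def pvAsc (x y : Int) : Nat → List (Int × Int)
  | 0 => [(x, y)]
  | n + 1 => (x, y) :: pvAsc (x + 1) y n

def pvDesc (x y : Int) : Nat → List (Int × Int)
  | 0 => [(x, y)]
  | n + 1 => (x, y) :: pvDesc (x - 1) y n

lemma pvAsc_eq_pyRange (y : Int) (n : Nat) : ∀ x : Int,
    (PySem.List.pyRange x (x + (n : Int) + 1) 1).map (fun t => (t, y)) = pvAsc x y n := by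
  induction n with
  | zero => intro x; simp [PySem.List.pyRange_one_singleton, pvAsc]
  | succ k ih =>
    intro x
    rw [PySem.List.pyRange_one_cons (by push_cast; omega)]
    have : x + ((k : Int) + 1) + 1 = (x + 1) + (k : Int) + 1 := by ring
    push_cast
    rw [this, List.map_cons, ih (x + 1)]
    rfl

lemma pvDesc_eq_pyRange (y : Int) (n : Nat) : ∀ x : Int,
    (PySem.List.pyRange x (x - (n : Int) - 1) (-1)).map (fun t => (t, y)) = pvDesc x y n := by
  induction n with
  | zero =>
    intro x
    rw [PySem.List.pyRange_neg_one_cons (by omega), PySem.List.pyRange_neg_one_eq_nil (by omega)]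
    simp [pvDesc]
  | succ k ih =>
    intro x
    rw [PySem.List.pyRange_neg_one_cons (by push_cast; omega)]
    have : x - ((k : Int) + 1) - 1 = (x - 1) - (k : Int) - 1 := by ring
    push_cast
    rw [this, List.map_cons, ih (x - 1)]
    rfl

lemma pvAsc_cons (x y : Int) (n : Nat) : pvAsc x y n = (x, y) :: (pvAsc x y n).tail := by
  cases n <;> rfl

lemma pvDesc_cons (x y : Int) (n : Nat) : pvDesc x y n = (x, y) :: (pvDesc x y n).tail := by
  cases n <;> rfl

lemma pvAsc_getLastD (y : Int) (n : Nat) : ∀ (x : Int) (d : Int × Int),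
    (pvAsc x y n).getLastD d = (x + n, y) := by
  induction n with
  | zero => intro x d; simp [pvAsc]
  | succ k ih =>
    intro x d
    rw [pvAsc, List.getLastD_cons, ih (x + 1)]
    congr 1; push_cast; ring

lemma pvDesc_getLastD (y : Int) (n : Nat) : ∀ (x : Int) (d : Int × Int),
    (pvDesc x y n).getLastD d = (x - n, y) := by
  induction n with
  | zero => intro x d; simp [pvDesc]
  | succ k ih =>
    intro x d
    rw [pvDesc, List.getLastD_cons, ih (x - 1)]
    congr 1; push_cast; ring

lemma pvStepA_right (x y : Int) : pvStepA (x, y) (x + 1, y) = ['r'] := by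
  simp [pvStepA]

lemma pvStepA_left (x y : Int) : pvStepA (x, y) (x - 1, y) = ['l'] := by
  norm_num [pvStepA]

lemma pvStepA_down (x y : Int) : pvStepA (x, y) (x, y + 1) = ['b'] := by
  simp [pvStepA]

lemma pvR_asc (y : Int) (n : Nat) : ∀ x : Int, pvR (pvAsc x y n) = List.replicate n 'r' := by
  induction n with
  | zero => intro x; rfl
  | succ k ih =>
    intro x
    rw [pvAsc, pvAsc_cons (x + 1) y k, pvR, ← pvAsc_cons (x + 1) y k, ih (x + 1),
        pvStepA_right]
    rfl

lemma pvR_desc (y : Int) (n : Nat) : ∀ x : Int, pvR (pvDesc x y n) = List.replicate n 'l' := by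
  induction n with
  | zero => intro x; rfl
  | succ k ih =>
    intro x
    rw [pvDesc, pvDesc_cons (x - 1) y k, pvR, ← pvDesc_cons (x - 1) y k, ih (x - 1),
        pvStepA_left]
    rfl

lemma pvR_append (b : Int × Int) (cs : List (Int × Int)) : ∀ as : List (Int × Int),
    pvR (as ++ b :: cs) = pvR (as ++ [b]) ++ pvR (b :: cs) := by
  intro as
  induction as with
  | nil => simp [pvR]
  | cons a as' ih =>
    cases as' with
    | nil => simp [pvR]
    | cons a' t =>
      simp only [List.cons_append, pvR] at *
      rw [ih]
      simp [List.append_assoc]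

lemma pvR_snoc (b d : Int × Int) : ∀ as : List (Int × Int), as ≠ [] →
    pvR (as ++ [b]) = pvR as ++ pvStepA (as.getLastD d) b := by
  intro as
  induction as with
  | nil => intro h; exact absurd rfl h
  | cons a as' ih =>
    intro _
    cases as' with
    | nil => simp [pvR]
    | cons a' t =>
      simp only [List.cons_append, pvR]
      rw [show a' :: (t ++ [b]) = (a' :: t) ++ [b] from rfl, ih (by simp)]
      simp [List.append_assoc]

-- the serpentine path, row by row
def pvRow (mx my : Int) (n : Nat) (i : Nat) : List (Int × Int) :=
  if i % 2 = 0 then pvAsc mx (my + i) n else pvDesc (mx + n) (my + i) n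

def pvSerp (mx my : Int) (n : Nat) : Nat → List (Int × Int)
  | 0 => pvRow mx my n 0
  | m + 1 => pvSerp mx my n m ++ pvRow mx my n (m + 1)

def pvRowHead (mx my : Int) (n i : Nat) : Int × Int :=
  (if i % 2 = 0 then mx else mx + n, my + i)

def pvRowLast (mx my : Int) (n i : Nat) : Int × Int :=
  (if i % 2 = 0 then mx + n else mx, my + i)

lemma pvRow_cons (mx my : Int) (n i : Nat) :
    pvRow mx my n i = pvRowHead mx my n i :: (pvRow mx my n i).tail := by
  unfold pvRow pvRowHead
  by_cases h : i % 2 = 0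
  · rw [if_pos h, if_pos h]; exact pvAsc_cons _ _ _
  · rw [if_neg h, if_neg h]; exact pvDesc_cons _ _ _

lemma pvRow_getLastD (mx my : Int) (n i : Nat) (d : Int × Int) :
    (pvRow mx my n i).getLastD d = pvRowLast mx my n i := by
  unfold pvRow pvRowLast
  by_cases h : i % 2 = 0
  · rw [if_pos h, if_pos h, pvAsc_getLastD]
  · rw [if_neg h, if_neg h, pvDesc_getLastD]; congr 1; ring

lemma pvR_row (mx my : Int) (n i : Nat) :
    pvR (pvRow mx my n i) = List.replicate n (if i % 2 = 0 then 'r' else 'l') := by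
  unfold pvRow
  by_cases h : i % 2 = 0 <;> simp [h, pvR_asc, pvR_desc]

lemma pvGetLastD_append_cons (h : Int × Int) (t : List (Int × Int)) :
    ∀ (as : List (Int × Int)) (d : Int × Int),
    (as ++ h :: t).getLastD d = (h :: t).getLastD d := by
  intro as
  induction as with
  | nil => intro d; rfl
  | cons a as' ih =>
    intro d
    rw [List.cons_append, List.getLastD_cons, ih a]
    simp only [List.getLastD_cons]

lemma pvSerp_ne_nil (mx my : Int) (n : Nat) : ∀ m : Nat, pvSerp mx my n m ≠ [] := by
  intro m
  cases m with
  | zero => show pvRow mx my n 0 ≠ []; rw [pvRow_cons]; simp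
  | succ k =>
    show pvSerp mx my n k ++ pvRow mx my n (k + 1) ≠ []
    rw [pvRow_cons]
    simp

lemma pvSerp_head? (mx my : Int) (n : Nat) : ∀ m : Nat,
    (pvSerp mx my n m).head? = some (mx, my) := by
  intro m
  induction m with
  | zero =>
    show (pvRow mx my n 0).head? = _
    rw [pvRow_cons]
    simp [pvRowHead]
  | succ k ih =>
    show (pvSerp mx my n k ++ pvRow mx my n (k + 1)).head? = _
    rw [List.head?_append_of_ne_nil _ (pvSerp_ne_nil mx my n k)]
    exact ih

lemma pvSerp_getLastD (mx my : Int) (n : Nat) (d : Int × Int) : ∀ m : Nat,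
    (pvSerp mx my n m).getLastD d = pvRowLast mx my n m := by
  intro m
  cases m with
  | zero => exact pvRow_getLastD mx my n 0 d
  | succ k =>
    show ((pvSerp mx my n k) ++ pvRow mx my n (k + 1)).getLastD d = _
    rw [pvRow_cons, pvGetLastD_append_cons, ← pvRow_cons, pvRow_getLastD]

-- joined rows: the serpentine route without the return leg
def pvJoin (n : Nat) : Nat → List Char
  | 0 => List.replicate n 'r'
  | m + 1 => pvJoin n m ++ 'b' :: List.replicate n (if (m + 1) % 2 = 0 then 'r' else 'l')

lemma pvR_serp (mx my : Int) (n : Nat) : ∀ m : Nat,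
    pvR (pvSerp mx my n m) = pvJoin n m := by
  intro m
  induction m with
  | zero => exact pvR_row mx my n 0
  | succ k ih =>
    show pvR (pvSerp mx my n k ++ pvRow mx my n (k + 1)) = _
    rw [pvRow_cons, pvR_append, ← pvRow_cons,
        pvR_snoc (pvRowHead mx my n (k + 1)) (0, 0) _ (pvSerp_ne_nil mx my n k),
        pvSerp_getLastD, ih, pvR_row]
    have hc : my + ((k + 1 : Nat) : Int) = (my + (k : Int)) + 1 := by push_cast; ring
    have hstep : pvStepA (pvRowLast mx my n k) (pvRowHead mx my n (k + 1)) = ['b'] := by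
      unfold pvRowLast pvRowHead
      rcases Nat.even_or_odd k with he | ho
      · have h1 : k % 2 = 0 := Nat.even_iff.mp he
        have h2 : ¬ (k + 1) % 2 = 0 := by omega
        rw [if_pos h1, if_neg h2, hc]
        exact pvStepA_down (mx + (n : Int)) (my + (k : Int))
      · have h1 : ¬ k % 2 = 0 := by have := Nat.odd_iff.mp ho; omega
        have h2 : (k + 1) % 2 = 0 := by have := Nat.odd_iff.mp ho; omega
        rw [if_neg h1, if_pos h2, hc]
        exact pvStepA_down mx (my + (k : Int))
    rw [hstep, pvJoin]
    simp

-- A's path fold equals pvSerp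
lemma pvFlatA (mx my : Int) (n : Nat) : ∀ m : Nat,
    (PySem.List.pyRange 0 ((m : Int) + 1) 1).flatMap (fun i =>
      (if PySem.Int.mod i 2 = 0
       then PySem.List.pyRange mx (mx + (n : Int) + 1) 1
       else PySem.List.pyRange (mx + (n : Int)) (mx - 1) (-1)).map (fun x => (x, my + i)))
    = pvSerp mx my n m := by
  intro m
  induction m with
  | zero =>
    rw [show ((0 : Nat) : Int) + 1 = 0 + 1 by norm_num,
        PySem.List.pyRange_one_singleton (a := 0)]
    simp only [List.flatMap_cons, List.flatMap_nil, List.append_nil]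
    rw [if_pos (by decide)]
    show _ = pvRow mx my n 0
    rw [pvRow, if_pos (by decide)]
    simp only [Nat.cast_zero, add_zero]
    exact pvAsc_eq_pyRange my n mx
  | succ k ih =>
    rw [show (((k + 1 : Nat) : Int)) + 1 = ((k : Int) + 1) + 1 by push_cast; ring,
        PySem.List.pyRange_one_succ_right (a := 0) (b := (k : Int) + 1) (by omega),
        List.flatMap_append, ih]
    simp only [List.flatMap_cons, List.flatMap_nil, List.append_nil]
    show _ = pvSerp mx my n k ++ pvRow mx my n (k + 1)
    congr 1
    have hc : (PySem.Int.mod ((k : Int) + 1) 2 = 0) ↔ (k + 1) % 2 = 0 := by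
      rw [PySem.Int.mod_eq_emod_of_pos (by omega)]; omega
    have h2 : my + ((k : Int) + 1) = my + ((k + 1 : Nat) : Int) := by push_cast; ring
    rw [pvRow, if_congr hc rfl rfl]
    by_cases hp : (k + 1) % 2 = 0
    · rw [if_pos hp, if_pos hp]
      simp only [h2]
      exact pvAsc_eq_pyRange _ n mx
    · rw [if_neg hp, if_neg hp,
          show mx - 1 = (mx + (n : Int)) - (n : Int) - 1 by ring]
      simp only [h2]
      exact pvDesc_eq_pyRange _ n (mx + (n : Int))

lemma pvPath_eq (mx my : Int) (n : Nat) (m : Nat) :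
    (PySem.List.pyRange 0 ((m : Int) + 1) 1).foldl (fun acc row_idx =>
      ((if PySem.Int.mod row_idx 2 = 0
        then PySem.List.pyRange mx (mx + (n : Int) + 1) 1
        else PySem.List.pyRange (mx + (n : Int)) (mx - 1) (-1)).foldl
          (fun acc x => acc ++ [(x, my + row_idx)]) acc)) ([] : List (Int × Int))
    = pvSerp mx my n m := by
  rw [← pvFlatA mx my n m, ← List.nil_append
        ((PySem.List.pyRange 0 ((m : Int) + 1) 1).flatMap _)]
  rw [← PySem.List.foldl_append_eq_flatMap]
  congr 1
  funext acc i
  rw [PySem.List.foldl_append_singleton_eq_map]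

-- B's per-row run, as a function of the row index
def pvRep (n i : Nat) : List Char := List.replicate n (if i % 2 = 0 then 'r' else 'l')

-- B's joined rows 0..m-1, each followed by its 'b' separator
def pvJoinB (n : Nat) : Nat → List Char
  | 0 => []
  | m + 1 => pvJoinB n m ++ pvRep n m ++ ['b']

lemma pvJoin_eq (n : Nat) : ∀ m : Nat, pvJoin n m = pvJoinB n m ++ pvRep n m := by
  intro m
  induction m with
  | zero => simp [pvJoin, pvJoinB, pvRep]
  | succ k ih =>
    rw [pvJoin, pvJoinB, ih]
    simp [pvRep, List.append_assoc]

lemma pvFlatB (n : Nat) : ∀ m : Nat,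
    (PySem.List.pyRange 0 (m : Int) 1).flatMap (fun i =>
      List.replicate n (if PySem.Int.mod i 2 = 0 then 'r' else 'l') ++ ['b'])
    = pvJoinB n m := by
  intro m
  induction m with
  | zero => rw [show ((0 : Nat) : Int) = 0 by rfl, PySem.List.pyRange_one_eq_nil (by omega)]; rfl
  | succ k ih =>
    rw [show ((k + 1 : Nat) : Int) = (k : Int) + 1 by push_cast; ring,
        PySem.List.pyRange_one_succ_right (a := 0) (b := (k : Int)) (by omega),
        List.flatMap_append, ih]
    simp only [List.flatMap_cons, List.flatMap_nil, List.append_nil]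
    rw [pvJoinB, List.append_assoc]
    congr 1
    have hc : (PySem.Int.mod (k : Int) 2 = 0) ↔ k % 2 = 0 := by
      rw [PySem.Int.mod_eq_emod_of_pos (by omega)]; omega
    rw [if_congr hc rfl rfl]
    rfl

lemma pvBFold_eq (n : Nat) (m : Nat) :
    (PySem.List.pyRange 0 ((m : Int) + 1) 1).foldl (fun acc row_idx =>
      (if row_idx ≠ (m : Int)
       then (acc ++ List.replicate n (if PySem.Int.mod row_idx 2 = 0 then 'r' else 'l')) ++ ['b']
       else acc ++ List.replicate n (if PySem.Int.mod row_idx 2 = 0 then 'r' else 'l')))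
      ([] : List Char)
    = pvJoin n m := by
  rw [PySem.List.pyRange_one_succ_right (a := 0) (b := (m : Int)) (by omega), List.foldl_append]
  have hpre : (PySem.List.pyRange 0 (m : Int) 1).foldl (fun acc row_idx =>
      (if row_idx ≠ (m : Int)
       then (acc ++ List.replicate n (if PySem.Int.mod row_idx 2 = 0 then 'r' else 'l')) ++ ['b']
       else acc ++ List.replicate n (if PySem.Int.mod row_idx 2 = 0 then 'r' else 'l')))
      ([] : List Char)
      = pvJoinB n m := by
    rw [← pvFlatB n m, ← List.nil_append ((PySem.List.pyRange 0 (m : Int) 1).flatMap _),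
        ← PySem.List.foldl_append_eq_flatMap]
    apply PySem.List.foldl_congr_mem
    intro acc i hi
    have hlt : i < (m : Int) := (PySem.List.mem_pyRange_one.mp hi).2
    rw [if_pos (by omega), List.append_assoc]
  rw [hpre]
  simp only [List.foldl_cons, List.foldl_nil, if_neg (by simp : ¬ ((m : Int) ≠ (m : Int)))]
  rw [pvJoin_eq]
  congr 1
  have hc : (PySem.Int.mod (m : Int) 2 = 0) ↔ m % 2 = 0 := by
    rw [PySem.Int.mod_eq_emod_of_pos (by omega)]; omega
  rw [if_congr hc rfl rfl]
  rfl

-- return legs of A as closed forms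
lemma pvLegT (m : Nat) :
    (if -(m : Int) > 0 then List.replicate (-(m : Int)).toNat 'b'
     else if -(m : Int) < 0 then List.replicate (-(-(m : Int))).toNat 't' else [])
    = List.replicate m 't' := by
  cases m with
  | zero => norm_num
  | succ k =>
    rw [if_neg (by omega), if_pos (by omega)]
    simp only [neg_neg, Int.toNat_natCast]

lemma pvLegL (mx : Int) (n m : Nat) :
    (if mx - (if m % 2 = 0 then mx + (n : Int) else mx) > 0
     then List.replicate (mx - (if m % 2 = 0 then mx + (n : Int) else mx)).toNat 'r'
     else if mx - (if m % 2 = 0 then mx + (n : Int) else mx) < 0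
       then List.replicate (-(mx - (if m % 2 = 0 then mx + (n : Int) else mx))).toNat 'l' else [])
    = if m % 2 = 0 then List.replicate n 'l' else [] := by
  by_cases h : m % 2 = 0
  · simp only [if_pos h]
    cases n with
    | zero => norm_num
    | succ k =>
      rw [if_neg (by omega), if_pos (by omega)]
      congr 1
      omega
  · simp only [if_neg h]
    norm_num

-- ===== VERDICT (by name: the statement is the Claim_ definition above) =====
theorem zone_to_route_py_spec : Claim_equal_zone_to_route_py := by
  intro c1 c2 _
  obtain ⟨x1, y1⟩ := c1
  obtain ⟨x2, y2⟩ := c2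
  unfold Spec_zone_to_route_py zone_to_route_py zone_to_route_py_alt
  dsimp only
  obtain ⟨n, hn⟩ : ∃ n : Nat, max x1 x2 = min x1 x2 + (n : Int) :=
    ⟨(max x1 x2 - min x1 x2).toNat, by omega⟩
  obtain ⟨m, hm⟩ : ∃ m : Nat, max y1 y2 = min y1 y2 + (m : Int) :=
    ⟨(max y1 y2 - min y1 y2).toNat, by omega⟩
  have habsx : |x1 - x2| = (n : Int) := by rw [← max_sub_min_eq_abs]; omega
  have habsy : |y1 - y2| = (m : Int) := by rw [← max_sub_min_eq_abs]; omega
  simp only [hn, hm, habsx, habsy, add_sub_cancel_left, add_sub_cancel_right,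
    Int.toNat_natCast]
  rw [pvPath_eq (min x1 x2) (min y1 y2) n m]
  rw [PySem.List.foldl_append_eq_flatMap, List.nil_append, pvR_eq_flatMap, pvR_serp]
  rw [PySem.List.pyGet?_neg_one, PySem.List.pyGet?_zero,
      ← List.getLastD_eq_getLast?, pvSerp_getLastD,
      ← List.head?_eq_getElem?, pvSerp_head?]
  rw [pvBFold_eq n m]
  simp only [Option.getD_some, pvRowLast]
  have e1 : min y1 y2 - (min y1 y2 + (m : Int)) = -(m : Int) := by ring
  simp only [e1]
  rw [pvLegT m, pvLegL (min x1 x2) n m]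
  have hc : (PySem.Int.mod (m : Int) 2 = 0) ↔ m % 2 = 0 := by
    rw [PySem.Int.mod_eq_emod_of_pos (by omega)]; omega
  rw [if_congr hc rfl rfl]
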